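-- pv_equiv track=rewrite | github.com/wschung1113/programmers-algorithm | 대충 만든 자판.py | solution
-- ===== SOURCE A (Python) =====
-- def solution(keymap, targets):
--     answer = []
--     min_dict = {}
--     for t in targets:
--         cnt = 0
--         for c in t:
--             if c in min_dict:
--                 cnt += min_dict[c]
--             else:
--                 c_indexes = [k.index(c) + 1 for k in keymap if c in k]
--                 if c_indexes == []:
--                     answer.append(-1)
--                     break
--                 min_dict[c] = min(c_indexes)
--                 cnt += min_dict[c]
--         else:
--             answer.append(cnt)
--     return answer
-- ===== SOURCE B (Python) =====
-- def solution(keymap, targets):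
--     # Precompute: cheapest keystroke count for every typeable character.
--     table = {}
--     for k in keymap:
--         for i, c in enumerate(k):
--             cost = i + 1
--             if c not in table or cost < table[c]:
--                 table[c] = cost
--     res = []
--     for t in targets:
--         if all(c in table for c in t):
--             res.append(sum(table[c] for c in t))
--         else:
--             res.append(-1)
--     return res
-- ===== Notes on version B (the rewrite author's own statement) =====
-- stated objective: simpler
-- what changed: B precomputes a complete char->min-keystroke table in one pass over the keymaps and then answers each target by pure lookups (all/sum), instead of A's lazy on-demand keymap scanning with a memo dict and a break threaded through the target loop.
import Mathlib
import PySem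

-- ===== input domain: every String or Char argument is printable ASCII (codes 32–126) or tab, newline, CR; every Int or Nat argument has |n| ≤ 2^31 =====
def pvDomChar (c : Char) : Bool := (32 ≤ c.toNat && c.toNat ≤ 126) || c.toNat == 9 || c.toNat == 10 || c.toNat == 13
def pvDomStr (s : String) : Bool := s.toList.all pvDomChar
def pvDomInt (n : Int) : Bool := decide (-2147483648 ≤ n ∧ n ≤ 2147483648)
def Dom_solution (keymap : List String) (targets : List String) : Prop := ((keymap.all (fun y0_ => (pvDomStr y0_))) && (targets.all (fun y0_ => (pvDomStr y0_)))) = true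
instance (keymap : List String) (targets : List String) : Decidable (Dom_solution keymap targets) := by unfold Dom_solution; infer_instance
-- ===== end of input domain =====

-- B replaces A's lazy memoised keymap scanning (a dict threaded through the
-- target loop, with a break) with a one-pass precomputed cost table followed by
-- a pure-lookup pass over the targets (objective: simpler).

-- ===== PORT A =====
-- [k.index(c) + 1 for k in keymap if c in k]
def solutionIdx (keymap : List String) (c : Char) : List Int :=
  keymap.filterMap (fun k =>
    if c ∈ k.toList then some (((PySem.List.index? k.toList c).getD 0 : Int) + 1) else none)

-- the inner 'for c in t' loop: returns (some cnt) on normal exit, none on break,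
-- together with the updated min_dict
def solutionChars (keymap : List String) :
    List Char → PySem.Dict Char Int → Int → Option Int × PySem.Dict Char Int
  | [], md, cnt => (some cnt, md)
  | c :: rest, md, cnt =>
    match md.get? c with
    | some v => solutionChars keymap rest md (cnt + v)
    | none =>
      let cIdx := solutionIdx keymap c
      if cIdx = [] then (none, md)
      else
        let m := (PySem.List.min? cIdx (fun x => x)).getD 0
        solutionChars keymap rest (md.insert c m) (cnt + m)

-- the outer 'for t in targets' loop (for…else: none ⇒ broke ⇒ append -1)
def solutionLoop (keymap : List String) :
    List String → List Int → PySem.Dict Char Int → List Int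
  | [], ans, _ => ans
  | t :: ts, ans, md =>
    match solutionChars keymap t.toList md 0 with
    | (some cnt, md') => solutionLoop keymap ts (ans ++ [cnt]) md'
    | (none, md') => solutionLoop keymap ts (ans ++ [-1]) md'

def solution (keymap : List String) (targets : List String) : List Int :=
  solutionLoop keymap targets [] PySem.Dict.empty

-- ===== PORT B =====
-- phase 1: table[c] = minimal keystroke cost of c over all keymaps
def buildTable (keymap : List String) : PySem.Dict Char Int :=
  keymap.foldl (fun tb k =>
    (PySem.List.enumerate k.toList 0).foldl (fun tb p =>
      let cost := p.1 + 1
      match tb.get? p.2 with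
      | none => tb.insert p.2 cost
      | some v => if cost < v then tb.insert p.2 cost else tb) tb) PySem.Dict.empty

-- phase 2: pure lookups
def solution_alt (keymap : List String) (targets : List String) : List Int :=
  let table := buildTable keymap
  targets.map (fun t =>
    if t.toList.all (fun c => table.contains c) then
      t.toList.foldl (fun s c => s + table.getD c 0) 0
    else -1)

-- ===== PRECONDITION & SPEC =====
def Spec_solution (keymap : List String) (targets : List String) (out : List Int) : Prop := out = solution_alt keymap targets
instance (keymap : List String) (targets : List String) (out : List Int) : Decidable (Spec_solution keymap targets out) := by unfold Spec_solution; infer_instance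

-- ===== CLAIM (what is proved, stated in full; the proofs are below) =====
def Claim_equal_solution : Prop := ∀ (keymap : List String) (targets : List String), Dom_solution keymap targets → Spec_solution keymap targets (solution keymap targets)

-- ===== LEMMAS AND PROOFS =====

-- optional-min (min of two Python "maybe not yet seen" costs)
def omin : Option Int → Option Int → Option Int
  | none, b => b
  | some a, none => some a
  | some a, some b => some (min a b)

@[simp] lemma omin_none_right (a : Option Int) : omin a none = a := by cases a <;> rfl

lemma omin_assoc (a b c : Option Int) : omin (omin a b) c = omin a (omin b c) := by
  cases a <;> cases b <;> cases c <;> simp [omin, min_assoc]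

-- cost of the FIRST occurrence of c in cs, positions starting at p
def fOcc : List Char → Int → Char → Option Int
  | [], _, _ => none
  | x :: xs, p, c => if x = c then some (p + 1) else fOcc xs (p + 1) c

lemma fOcc_ge (cs : List Char) (p : Int) (c : Char) (v : Int)
    (h : fOcc cs p c = some v) : p + 1 ≤ v := by
  induction cs generalizing p with
  | nil => simp [fOcc] at h
  | cons x xs ih =>
    by_cases hx : x = c
    · simp [fOcc, hx] at h; omega
    · simp [fOcc, hx] at h; have := ih (p + 1) h; omega

-- the canonical per-char minimal cost (A's list, minimised)
def best? (keymap : List String) (c : Char) : Option Int :=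
  PySem.List.min? (solutionIdx keymap c) (fun x => x)

-- ---- B side: the table computes best? ----

lemma inner_get (c : Char) (cs : List Char) :
    ∀ (p : Int) (tb : PySem.Dict Char Int),
    ((PySem.List.enumerate cs p).foldl (fun tb q =>
      let cost := q.1 + 1
      match tb.get? q.2 with
      | none => tb.insert q.2 cost
      | some v => if cost < v then tb.insert q.2 cost else tb) tb).get? c
    = omin (tb.get? c) (fOcc cs p c) := by
  induction cs with
  | nil => intro p tb; simp [PySem.List.enumerate_nil, fOcc]
  | cons x xs ih =>
    intro p tb
    rw [PySem.List.enumerate_cons, List.foldl_cons, ih]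
    by_cases hx : x = c
    · subst hx
      have hstep : ((match tb.get? x with
          | none => tb.insert x (p + 1)
          | some v => if p + 1 < v then tb.insert x (p + 1) else tb) : PySem.Dict Char Int).get? x
          = omin (tb.get? x) (some (p + 1)) := by
        cases h : tb.get? x with
        | none => simp [PySem.Dict.get?_insert_self, omin]
        | some v =>
          by_cases hlt : p + 1 < v
          · simp [hlt, PySem.Dict.get?_insert_self, omin]; omega
          · simp [hlt, h, omin]; omega
      rw [hstep, omin_assoc]
      congr 1
      cases hocc : fOcc xs (p + 1) x with
      | none => simp [fOcc, omin]
      | some w =>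
        have := fOcc_ge xs (p + 1) x w hocc
        simp [fOcc, omin]
        omega
    · have hstep : ((match tb.get? x with
          | none => tb.insert x (p + 1)
          | some v => if p + 1 < v then tb.insert x (p + 1) else tb) : PySem.Dict Char Int).get? c
          = tb.get? c := by
        cases h : tb.get? x with
        | none =>
          exact PySem.Dict.get?_insert_of_ne tb (p + 1) (fun hh => hx hh.symm)
        | some v =>
          by_cases hlt : p + 1 < v
          · simp only [hlt, if_true]
            exact PySem.Dict.get?_insert_of_ne tb (p + 1) (fun hh => hx hh.symm)
          · simp [hlt]
      rw [hstep]
      congr 1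
      simp [fOcc, hx]

lemma outer_get (c : Char) (ks : List String) :
    ∀ (tb : PySem.Dict Char Int),
    (ks.foldl (fun tb k =>
      (PySem.List.enumerate k.toList 0).foldl (fun tb q =>
        let cost := q.1 + 1
        match tb.get? q.2 with
        | none => tb.insert q.2 cost
        | some v => if cost < v then tb.insert q.2 cost else tb) tb) tb).get? c
    = ks.foldl (fun a k => omin a (fOcc k.toList 0 c)) (tb.get? c) := by
  induction ks with
  | nil => intro tb; rfl
  | cons k ks ih =>
    intro tb
    rw [List.foldl_cons, List.foldl_cons, ih, inner_get]

-- fOcc at offset 0 is A's comprehension element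
lemma fOcc_shift (cs : List Char) (c : Char) :
    ∀ p : Int, fOcc cs p c = (PySem.List.index? cs c).map (fun i => (i : Int) + 1 + p) := by
  induction cs with
  | nil => intro p; simp [fOcc, PySem.List.index?]
  | cons x xs ih =>
    intro p
    by_cases hx : x = c
    · subst hx; rw [PySem.List.index?_cons_self]; simp [fOcc]; ring
    · rw [PySem.List.index?_cons_of_ne xs hx]
      simp only [fOcc, hx, if_false, ih (p + 1)]
      cases PySem.List.index? xs c
      · simp
      · simp; ring

lemma fOcc_eq_f (k : String) (c : Char) :
    fOcc k.toList 0 c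
    = (if c ∈ k.toList then some (((PySem.List.index? k.toList c).getD 0 : Int) + 1) else none) := by
  rw [fOcc_shift]
  by_cases hm : c ∈ k.toList
  · obtain ⟨i, hi⟩ := Option.isSome_iff_exists.mp ((PySem.List.index?_isSome_iff k.toList c).mpr hm)
    rw [hi]; simp [hm]
  · rw [(PySem.List.index?_eq_none_iff _ _).mpr hm]; simp [hm]

lemma foldl_min_pull (t : List Int) : ∀ a b : Int, t.foldl min (min a b) = min a (t.foldl min b) := by
  induction t with
  | nil => intro a b; rfl
  | cons x xs ih =>
    intro a b
    simp only [List.foldl_cons]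
    rw [min_assoc, ih]

lemma min?_eq_foldl_omin (f : String → Option Int) (ks : List String) :
    ∀ acc : Option Int,
    ks.foldl (fun a k => omin a (f k)) acc = omin acc (PySem.List.min? (ks.filterMap f) (fun x => x)) := by
  induction ks with
  | nil => intro acc; simp [PySem.List.min?]
  | cons k ks ih =>
    intro acc
    rw [List.foldl_cons, ih, List.filterMap_cons]
    cases hk : f k with
    | none => simp
    | some v =>
      rw [omin_assoc]
      congr 1
      cases hrest : ks.filterMap f with
      | nil => simp [PySem.List.min?]
      | cons r t =>
        rw [PySem.List.min?_id_cons, PySem.List.min?_id_cons]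
        simp only [omin, List.foldl_cons]
        rw [foldl_min_pull]

lemma tableGet (keymap : List String) (c : Char) :
    (buildTable keymap).get? c = best? keymap c := by
  unfold buildTable best? solutionIdx
  rw [outer_get, PySem.Dict.get?_empty]
  have hfun : (fun (a : Option Int) (k : String) => omin a (fOcc k.toList 0 c))
      = (fun a k => omin a (if c ∈ k.toList then some (((PySem.List.index? k.toList c).getD 0 : Int) + 1) else none)) := by
    funext a k; rw [fOcc_eq_f]
  rw [hfun, min?_eq_foldl_omin]
  rfl

-- ---- A side: the memo dict only ever stores best? values ----

def goodMd (keymap : List String) (md : PySem.Dict Char Int) : Prop :=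
  ∀ c v, md.get? c = some v → best? keymap c = some v

lemma chars_eq (keymap : List String) (cs : List Char) :
    ∀ (md : PySem.Dict Char Int) (cnt : Int), goodMd keymap md →
    (solutionChars keymap cs md cnt).1
      = (if cs.all (fun c => (best? keymap c).isSome)
         then some (cs.foldl (fun s c => s + (best? keymap c).getD 0) cnt) else none)
    ∧ goodMd keymap (solutionChars keymap cs md cnt).2 := by
  induction cs with
  | nil => intro md cnt h; exact ⟨by simp [solutionChars], h⟩
  | cons c rest ih =>
    intro md cnt h
    cases hmd : md.get? c with
    | some v =>
      have hb : best? keymap c = some v := h c v hmd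
      have := ih md (cnt + v) h
      simpa [solutionChars, hmd, hb] using this
    | none =>
      by_cases hnil : solutionIdx keymap c = []
      · have hb : best? keymap c = none := by
          unfold best?; rw [hnil]; rfl
        refine ⟨?_, ?_⟩
        · simp [solutionChars, hmd, hnil, hb]
        · simp only [solutionChars, hmd, hnil, if_true]; exact h
      · obtain ⟨m, hm⟩ : ∃ m, PySem.List.min? (solutionIdx keymap c) (fun x => x) = some m := by
          cases hq : PySem.List.min? (solutionIdx keymap c) (fun x => x) with
          | none => exact absurd ((PySem.List.min?_eq_none_iff _ _).mp hq) hnil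
          | some m => exact ⟨m, rfl⟩
        have hb : best? keymap c = some m := hm
        have hgood' : goodMd keymap (md.insert c m) := by
          intro c' v' hv'
          rw [PySem.Dict.get?_insert] at hv'
          split_ifs at hv' with hc
          · subst hc; exact hb.trans hv'
          · exact h c' v' hv'
        have := ih (md.insert c m) (cnt + m) hgood'
        simpa [solutionChars, hmd, hnil, hm, hb] using this

-- the per-target value both programs compute
def targetVal (keymap : List String) (t : String) : Int :=
  if t.toList.all (fun c => (best? keymap c).isSome)
  then t.toList.foldl (fun s c => s + (best? keymap c).getD 0) 0 else -1

lemma loop_eq (keymap : List String) (ts : List String) :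
    ∀ (ans : List Int) (md : PySem.Dict Char Int), goodMd keymap md →
    solutionLoop keymap ts ans md = ans ++ ts.map (targetVal keymap) := by
  induction ts with
  | nil => intro ans md _; simp [solutionLoop]
  | cons t ts ih =>
    intro ans md h
    obtain ⟨h1, h2⟩ := chars_eq keymap t.toList md 0 h
    rcases hE : solutionChars keymap t.toList md 0 with ⟨o, md'⟩
    rw [hE] at h1 h2
    simp only at h1 h2
    by_cases hc : t.toList.all (fun c => (best? keymap c).isSome)
    · rw [if_pos hc] at h1
      simp only [solutionLoop, hE, h1]
      rw [ih (ans ++ [t.toList.foldl (fun s c => s + (best? keymap c).getD 0) 0]) md' h2]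
      simp [targetVal, hc]
    · rw [if_neg hc] at h1
      simp only [solutionLoop, hE, h1]
      rw [ih (ans ++ [-1]) md' h2]
      simp [targetVal, hc]

lemma alt_eq (keymap : List String) (targets : List String) :
    solution_alt keymap targets = targets.map (targetVal keymap) := by
  unfold solution_alt
  simp only []
  apply List.map_congr_left
  intro t _
  unfold targetVal
  have hcontains : ∀ c : Char, (buildTable keymap).contains c = (best? keymap c).isSome := by
    intro c; rw [PySem.Dict.contains_eq_isSome_get?, tableGet]
  have hgetD : ∀ c : Char, (buildTable keymap).getD c 0 = (best? keymap c).getD 0 := by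
    intro c; rw [PySem.Dict.getD_eq_get?_getD, tableGet]
  simp only [hcontains, hgetD]

-- ===== VERDICT (by name: the statement is the Claim_ definition above) =====
theorem solution_spec : Claim_equal_solution := by
  intro keymap targets _
  unfold Spec_solution solution
  have hgood : goodMd keymap PySem.Dict.empty := by
    intro c v h; rw [PySem.Dict.get?_empty] at h; exact absurd h (by simp)
  rw [loop_eq keymap targets [] PySem.Dict.empty hgood, alt_eq]
  rfl
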